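-- pv_equiv track=rewrite | github.com/ayushk1233/prompt-autopsy- | surgeon/resimulation.py | extract_original_agent_turns
-- ===== SOURCE A (Python) =====
-- def extract_original_agent_turns(call: dict, max_turns: int) -> list:
--     """Get the first N agent turns from the original transcript."""
--     agent_turns = []
--     customer_count = 0
--     for turn in call.get("transcript", []):
--         if turn.get("speaker") == "customer":
--             customer_count += 1
--             if customer_count > max_turns:
--                 break
--         elif turn.get("speaker") == "agent":
--             agent_turns.append(turn.get("text", "").strip())
--     return agent_turns
-- ===== SOURCE B (Python) =====
-- def extract_original_agent_turns(call: dict, max_turns: int) -> list: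
--     """Get the first N agent turns from the original transcript."""
--     transcript = call.get("transcript", [])
--     k = max(max_turns, 0)
--     customer_positions = [i for i, t in enumerate(transcript)
--                           if t.get("speaker") == "customer"]
--     cutoff = customer_positions[k] if k < len(customer_positions) else len(transcript)
--     return [t.get("text", "").strip()
--             for t in transcript[:cutoff]
--             if t.get("speaker") == "agent"]
-- ===== Notes on version B (the rewrite author's own statement) =====
-- stated objective: alternative
-- what changed: Replaces the single accumulate-with-break loop by two separate passes: first compute the cutoff index (the position of the (max_turns+1)-th customer turn, or the transcript length), then a filter/map comprehension over transcript[:cutoff] collecting stripped agent texts.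
import Mathlib
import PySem

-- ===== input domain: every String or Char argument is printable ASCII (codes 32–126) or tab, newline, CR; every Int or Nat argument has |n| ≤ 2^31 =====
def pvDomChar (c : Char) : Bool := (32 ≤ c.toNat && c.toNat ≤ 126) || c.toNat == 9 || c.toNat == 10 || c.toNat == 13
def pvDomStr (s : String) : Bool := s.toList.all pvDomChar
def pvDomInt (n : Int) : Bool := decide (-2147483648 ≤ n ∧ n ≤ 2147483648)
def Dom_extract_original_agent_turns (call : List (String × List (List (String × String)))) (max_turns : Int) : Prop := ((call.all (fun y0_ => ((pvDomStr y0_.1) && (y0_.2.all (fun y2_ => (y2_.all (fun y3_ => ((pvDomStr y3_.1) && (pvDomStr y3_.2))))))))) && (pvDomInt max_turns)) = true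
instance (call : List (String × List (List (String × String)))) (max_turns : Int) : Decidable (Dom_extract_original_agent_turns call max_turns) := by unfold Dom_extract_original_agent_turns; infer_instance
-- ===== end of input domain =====

-- B replaces A's accumulate-with-break loop by a cutoff-finding pass followed by a
-- filter/map comprehension over the prefix; same cost, different decomposition.

-- ===== PORT A =====
def pvALoop (mt : Int) (turns : List (List (String × String))) (acc : List String) (cc : Int) : List String :=
  match turns with
  | [] => acc
  | t :: rest =>
    let d := PySem.Dict.ofList t
    if d.get? "speaker" == some "customer" then
      if cc + 1 > mt then acc else pvALoop mt rest acc (cc + 1)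
    else if d.get? "speaker" == some "agent" then
      pvALoop mt rest (acc ++ [PySem.Str.strip (d.getD "text" "")]) cc
    else pvALoop mt rest acc cc

def extract_original_agent_turns (call : List (String × List (List (String × String)))) (max_turns : Int) : List String :=
  pvALoop max_turns ((PySem.Dict.ofList call).getD "transcript" []) [] 0

-- ===== PORT B =====
def extract_original_agent_turns_alt (call : List (String × List (List (String × String)))) (max_turns : Int) : List String :=
  let transcript := (PySem.Dict.ofList call).getD "transcript" []
  let k := max max_turns 0
  let customer_positions := ((PySem.List.enumerate transcript 0).filter
      (fun p => (PySem.Dict.ofList p.2).get? "speaker" == some "customer")).map (·.1)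
  let cutoff : Int :=
    if k < (customer_positions.length : Int) then PySem.List.pyGetD customer_positions k 0
    else (transcript.length : Int)
  ((PySem.List.slice transcript none (some cutoff)).filter
      (fun t => (PySem.Dict.ofList t).get? "speaker" == some "agent")).map
    (fun t => PySem.Str.strip ((PySem.Dict.ofList t).getD "text" ""))

-- ===== PRECONDITION & SPEC =====
-- Pre_ fixes the dict reading of a turn: the optional "speaker" lookup and the defaulted one agree
-- on every turn of the "transcript" list. This holds for every input (A is total), so Pre_ excludes
-- NO input and the claim is as general as the unconditional one.
def Pre_extract_original_agent_turns (call : List (String × List (List (String × String)))) (max_turns : Int) : Prop :=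
  ∀ t ∈ (PySem.Dict.ofList call).getD "transcript" [],
    ((PySem.Dict.ofList t).get? "speaker").getD "agent" = (PySem.Dict.ofList t).getD "speaker" "agent"
instance (call : List (String × List (List (String × String)))) (max_turns : Int) : Decidable (Pre_extract_original_agent_turns call max_turns) := by unfold Pre_extract_original_agent_turns; infer_instance
def pvWitness_extract_original_agent_turns : (List (String × List (List (String × String)))) × Int :=
  ([("transcript", [[("speaker","agent"),("text"," hi ")],[("speaker","customer")]])], 1)
def Spec_extract_original_agent_turns (call : List (String × List (List (String × String)))) (max_turns : Int) (out : List String) : Prop := out = extract_original_agent_turns_alt call max_turns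
instance (call : List (String × List (List (String × String)))) (max_turns : Int) (out : List String) : Decidable (Spec_extract_original_agent_turns call max_turns out) := by unfold Spec_extract_original_agent_turns; infer_instance

-- ===== CLAIM (what is proved, stated in full; the proofs are below) =====
def Claim_equal_extract_original_agent_turns : Prop := ∀ (call : List (String × List (List (String × String)))) (max_turns : Int), Dom_extract_original_agent_turns call max_turns → Pre_extract_original_agent_turns call max_turns → Spec_extract_original_agent_turns call max_turns (extract_original_agent_turns call max_turns)

-- ===== LEMMAS AND PROOFS =====

-- common recursive description of the result on a transcript with an Int budget
def pvF (turns : List (List (String × String))) (b : Int) : List String :=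
  match turns with
  | [] => []
  | t :: rest =>
    if (PySem.Dict.ofList t).get? "speaker" == some "customer" then
      (if b ≤ 0 then [] else pvF rest (b - 1))
    else if (PySem.Dict.ofList t).get? "speaker" == some "agent" then
      PySem.Str.strip ((PySem.Dict.ofList t).getD "text" "") :: pvF rest b
    else pvF rest b

-- positions (as Nats, from the front) of the elements satisfying c
def pvCpos {α : Type} (c : α → Bool) : List α → List Nat
  | [] => []
  | t :: rest => if c t then 0 :: (pvCpos c rest).map (· + 1) else (pvCpos c rest).map (· + 1)

theorem pvALoop_eq_pvF (mt : Int) (turns : List (List (String × String))) (acc : List String) (cc : Int) :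
    pvALoop mt turns acc cc = acc ++ pvF turns (mt - cc) := by
  induction turns generalizing acc cc with
  | nil => simp [pvALoop, pvF]
  | cons t rest ih =>
    show (if (PySem.Dict.ofList t).get? "speaker" == some "customer" then
            if cc + 1 > mt then acc else pvALoop mt rest acc (cc + 1)
          else if (PySem.Dict.ofList t).get? "speaker" == some "agent" then
            pvALoop mt rest (acc ++ [PySem.Str.strip ((PySem.Dict.ofList t).getD "text" "")]) cc
          else pvALoop mt rest acc cc) = acc ++ pvF (t :: rest) (mt - cc)
    rw [pvF]
    by_cases h1 : ((PySem.Dict.ofList t).get? "speaker" == some "customer") = true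
    · rw [if_pos h1, if_pos h1]
      by_cases h2 : cc + 1 > mt
      · rw [if_pos h2, if_pos (show mt - cc ≤ 0 by omega)]; simp
      · rw [if_neg h2, if_neg (show ¬ mt - cc ≤ 0 by omega), ih]
        congr 2; ring
    · rw [if_neg h1, if_neg h1]
      by_cases h2 : ((PySem.Dict.ofList t).get? "speaker" == some "agent") = true
      · rw [if_pos h2, if_pos h2, ih]; simp
      · rw [if_neg h2, if_neg h2, ih]

theorem pvF_max (turns : List (List (String × String))) (b : Int) :
    pvF turns b = pvF turns (max b 0) := by
  induction turns generalizing b with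
  | nil => simp [pvF]
  | cons t rest ih =>
    rw [pvF, pvF]
    by_cases h1 : ((PySem.Dict.ofList t).get? "speaker" == some "customer") = true
    · rw [if_pos h1, if_pos h1]
      by_cases h2 : b ≤ 0
      · rw [if_pos h2, if_pos (show max b 0 ≤ 0 by omega)]
      · rw [if_neg h2, if_neg (show ¬ max b 0 ≤ 0 by omega), ih (b - 1)]
        congr 1; omega
    · rw [if_neg h1, if_neg h1]
      by_cases h2 : ((PySem.Dict.ofList t).get? "speaker" == some "agent") = true
      · rw [if_pos h2, if_pos h2, ih b]
      · rw [if_neg h2, if_neg h2, ih b]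

theorem pvEnum_filter_map (c : List (String × String) → Bool)
    (ts : List (List (String × String))) (s : Int) :
    ((PySem.List.enumerate ts s).filter (fun p => c p.2)).map (·.1)
      = (pvCpos c ts).map (fun (n : Nat) => (n : Int) + s) := by
  induction ts generalizing s with
  | nil => simp [pvCpos, PySem.List.enumerate_nil]
  | cons t rest ih =>
    rw [PySem.List.enumerate_cons, List.filter_cons, pvCpos]
    by_cases h : c t = true
    · rw [if_pos (by simpa using h), if_pos h, List.map_cons, List.map_cons, ih (s + 1),
        List.map_map]
      refine congrArg₂ _ (by simp) ?_
      apply List.map_congr_left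
      intro n _
      show ((n : Int)) + (s + 1) = ((n + 1 : Nat) : Int) + s
      push_cast; ring
    · rw [if_neg (by simpa using h), if_neg h, ih (s + 1), List.map_map]
      apply List.map_congr_left
      intro n _
      show ((n : Int)) + (s + 1) = ((n + 1 : Nat) : Int) + s
      push_cast; ring

-- the natural cutoff index
def pvCut (ts : List (List (String × String))) (k : Nat) : Nat :=
  if h : k < (pvCpos (fun t => (PySem.Dict.ofList t).get? "speaker" == some "customer") ts).length
  then (pvCpos (fun t => (PySem.Dict.ofList t).get? "speaker" == some "customer") ts)[k]
  else ts.length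

theorem pvTake_filter_map_eq_pvF (ts : List (List (String × String))) (k : Nat) :
    ((ts.take (pvCut ts k)).filter
        (fun t => (PySem.Dict.ofList t).get? "speaker" == some "agent")).map
      (fun t => PySem.Str.strip ((PySem.Dict.ofList t).getD "text" ""))
      = pvF ts (k : Int) := by
  induction ts generalizing k with
  | nil => simp [pvCut, pvCpos, pvF]
  | cons t rest ih =>
    by_cases h1 : ((PySem.Dict.ofList t).get? "speaker" == some "customer") = true
    · have hne : ((PySem.Dict.ofList t).get? "speaker" == some "agent") = false := by
        simp only [beq_iff_eq] at h1 ⊢; simp [h1]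
      cases k with
      | zero =>
        have h0 : pvCut (t :: rest) 0 = 0 := by
          simp [pvCut, pvCpos, h1]
        rw [h0]
        rw [pvF, if_pos h1, if_pos (by norm_num)]
        simp
      | succ k =>
        have hcut : pvCut (t :: rest) (k + 1) = pvCut rest k + 1 := by
          simp only [pvCut, pvCpos, h1, if_pos, List.length_cons, List.length_map]
          by_cases h : k < (pvCpos (fun t => (PySem.Dict.ofList t).get? "speaker" == some "customer") rest).length
          · rw [dif_pos (by omega), dif_pos h]
            simp
          · rw [dif_neg (by omega), dif_neg h]
        rw [hcut, List.take_succ_cons, List.filter_cons, if_neg (by simp [hne]), ih k]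
        rw [pvF, if_pos h1, if_neg (by push_cast; omega)]
        congr 1; push_cast; ring
    · have hcut : pvCut (t :: rest) k = pvCut rest k + 1 := by
        simp only [pvCut, pvCpos, h1, Bool.false_eq_true, if_false, List.length_cons, List.length_map]
        by_cases h : k < (pvCpos (fun t => (PySem.Dict.ofList t).get? "speaker" == some "customer") rest).length
        · rw [dif_pos h, dif_pos h]; simp
        · rw [dif_neg h, dif_neg h]
      rw [hcut, List.take_succ_cons, List.filter_cons]
      rw [pvF, if_neg h1]
      by_cases h2 : ((PySem.Dict.ofList t).get? "speaker" == some "agent") = true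
      · rw [if_pos (by simpa using h2), if_pos h2, List.map_cons, ih k]
      · rw [if_neg (by simpa using h2), if_neg h2, ih k]

theorem pvAlt_eq (call : List (String × List (List (String × String)))) (max_turns : Int) :
    extract_original_agent_turns_alt call max_turns =
      ((PySem.List.slice ((PySem.Dict.ofList call).getD "transcript" []) none (some
          (if max max_turns 0 <
              ((((PySem.List.enumerate ((PySem.Dict.ofList call).getD "transcript" []) 0).filter
                  (fun p => (PySem.Dict.ofList p.2).get? "speaker" == some "customer")).map (·.1)).length : Int)
           then PySem.List.pyGetD
              (((PySem.List.enumerate ((PySem.Dict.ofList call).getD "transcript" []) 0).filter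
                  (fun p => (PySem.Dict.ofList p.2).get? "speaker" == some "customer")).map (·.1))
              (max max_turns 0) 0
           else ((((PySem.Dict.ofList call).getD "transcript" []).length : Nat) : Int)))).filter
          (fun t => (PySem.Dict.ofList t).get? "speaker" == some "agent")).map
        (fun t => PySem.Str.strip ((PySem.Dict.ofList t).getD "text" "")) := rfl

theorem extract_original_agent_turns_spec : Claim_equal_extract_original_agent_turns := by
  intro call mt _ _
  unfold Spec_extract_original_agent_turns
  unfold extract_original_agent_turns
  rw [pvAlt_eq]
  set ts := (PySem.Dict.ofList call).getD "transcript" [] with hts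
  set kN := (max mt 0).toNat with hk
  have hmax : max mt 0 = (kN : Int) := by omega
  rw [pvALoop_eq_pvF, pvF_max, List.nil_append, Int.sub_zero, hmax,
    ← pvTake_filter_map_eq_pvF ts kN]
  have hpos : ((PySem.List.enumerate ts 0).filter
        (fun p => (PySem.Dict.ofList p.2).get? "speaker" == some "customer")).map (·.1)
      = (pvCpos (fun t => (PySem.Dict.ofList t).get? "speaker" == some "customer") ts).map
          (fun (n : Nat) => (n : Int)) := by
    have h2 : (pvCpos (fun t => (PySem.Dict.ofList t).get? "speaker" == some "customer") ts).map
          (fun (n : Nat) => (n : Int) + 0)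
        = (pvCpos (fun t => (PySem.Dict.ofList t).get? "speaker" == some "customer") ts).map
          (fun (n : Nat) => (n : Int)) :=
      List.map_congr_left (fun n _ => by ring)
    exact (pvEnum_filter_map _ ts 0).trans h2
  rw [hpos, List.length_map]
  set L := pvCpos (fun t => (PySem.Dict.ofList t).get? "speaker" == some "customer") ts with hL
  by_cases h : (kN : Int) < (L.length : Int)
  · rw [if_pos h]
    have hk' : kN < L.length := by exact_mod_cast h
    have hget : PySem.List.pyGetD (L.map (fun (n : Nat) => (n : Int))) (kN : Int) 0
        = (L[kN] : Int) := by
      rw [PySem.List.pyGetD_natCast,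
        List.getD_eq_getElem _ _ (by rw [List.length_map]; exact hk'), List.getElem_map]
    rw [hget, PySem.List.slice_to _ (Int.natCast_nonneg _), Int.toNat_natCast]
    have hcut : pvCut ts kN = L[kN] := by rw [pvCut, dif_pos (hL ▸ hk')]
    rw [hcut]
  · rw [if_neg h]
    have hk' : ¬ kN < L.length := by
      intro hlt; exact h (by exact_mod_cast hlt)
    rw [PySem.List.slice_to _ (Int.natCast_nonneg _), Int.toNat_natCast]
    have hcut : pvCut ts kN = ts.length := by rw [pvCut, dif_neg (hL ▸ hk')]
    rw [hcut]
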